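-- pv_equiv track=rewrite | github.com/MarisKX/WebScrapProject | core/management/commands/update_apk.py | skip_to_last_plate
-- ===== SOURCE A (Python) =====
-- def skip_to_last_plate(generator, last_plate):
--     """Skip the generator to the plate after the last processed plate."""
--     skip = True
--     for plate in generator:
--         if skip and plate == last_plate:
--             skip = False  # Stop skipping once we reach the last plate
--             continue  # Skip the last plate itself
--         if not skip:
--             yield plate
-- ===== SOURCE B (Python) =====
-- def skip_to_last_plate(generator, last_plate):
--     """Skip the generator to the plate after the last processed plate."""
--     items = list(generator)
--     try:
--         start = items.index(last_plate) + 1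
--     except ValueError:
--         return
--     yield from items[start:]
-- ===== Notes on version B (the rewrite author's own statement) =====
-- stated objective: alternative
-- what changed: Replaces A's streaming flag loop with a staged decomposition: materialize the input into a list, locate last_plate with one index() lookup (yield nothing if absent), then slice off the prefix and yield the suffix.
import Mathlib
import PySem

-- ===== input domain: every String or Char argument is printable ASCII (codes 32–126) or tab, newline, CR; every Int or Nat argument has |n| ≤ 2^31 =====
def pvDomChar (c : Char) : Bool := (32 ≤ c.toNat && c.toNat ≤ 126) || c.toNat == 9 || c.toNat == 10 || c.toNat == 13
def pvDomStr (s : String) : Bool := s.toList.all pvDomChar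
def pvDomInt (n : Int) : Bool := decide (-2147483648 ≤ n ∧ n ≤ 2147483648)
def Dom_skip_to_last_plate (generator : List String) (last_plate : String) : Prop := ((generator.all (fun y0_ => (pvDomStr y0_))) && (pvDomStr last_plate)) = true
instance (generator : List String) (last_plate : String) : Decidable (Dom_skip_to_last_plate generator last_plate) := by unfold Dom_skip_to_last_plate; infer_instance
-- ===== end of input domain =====

-- B replaces A's streaming skip-flag loop with a staged decomposition: materialize, one index() lookup, then slice (alternative; same O(n) cost).


-- ===== PORT A =====
-- A's for-loop over the generator with the mutable `skip` flag, as structural recursion on the list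
def skipLoopA (last_plate : String) (skip : Bool) : List String → List String
  | [] => []
  | plate :: rest =>
    if skip && plate == last_plate then skipLoopA last_plate false rest
    else if !skip then plate :: skipLoopA last_plate skip rest
    else skipLoopA last_plate skip rest

def skip_to_last_plate (generator : List String) (last_plate : String) : List String :=
  skipLoopA last_plate true generator

-- ===== PORT B =====
-- items = list(generator); items.index(last_plate) (ValueError → yield nothing); yield from items[start:]
def skip_to_last_plate_alt (generator : List String) (last_plate : String) : List String :=
  match PySem.List.index? generator last_plate with
  | none => []
  | some i => PySem.List.slice generator (some ((i : Int) + 1)) none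

-- ===== PRECONDITION & SPEC =====
def Spec_skip_to_last_plate (generator : List String) (last_plate : String) (out : List String) : Prop := out = skip_to_last_plate_alt generator last_plate
instance (generator : List String) (last_plate : String) (out : List String) : Decidable (Spec_skip_to_last_plate generator last_plate out) := by unfold Spec_skip_to_last_plate; infer_instance

-- ===== CLAIM =====
def Claim_equal_skip_to_last_plate : Prop := ∀ (generator : List String) (last_plate : String), Dom_skip_to_last_plate generator last_plate → Spec_skip_to_last_plate generator last_plate (skip_to_last_plate generator last_plate)

-- ===== LEMMAS AND PROOFS =====
-- Once skip is false, A yields every remaining element unchanged.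
theorem skipLoopA_false (lp : String) (l : List String) : skipLoopA lp false l = l := by
  induction l with
  | nil => rfl
  | cons p t ih => simp [skipLoopA, ih]

-- In the skipping phase, A's output is B's index-then-slice value.
theorem skipLoopA_true (lp : String) (l : List String) :
    skipLoopA lp true l = skip_to_last_plate_alt l lp := by
  induction l with
  | nil => rfl
  | cons p t ih =>
    by_cases h : p = lp
    · subst h
      unfold skip_to_last_plate_alt
      rw [PySem.List.index?_cons_self]
      simp [skipLoopA, skipLoopA_false, PySem.List.slice_from_one]
    · rw [show skipLoopA lp true (p :: t) = skipLoopA lp true t by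
        simp [skipLoopA, h], ih]
      unfold skip_to_last_plate_alt
      rw [PySem.List.index?_cons_of_ne t h]
      cases hidx : PySem.List.index? t lp with
      | none => simp
      | some i =>
        simp only [Option.map_some]
        have h1 : ((i : Int) + 1) = ((i + 1 : Nat) : Int) := by push_cast; ring
        have h2 : (((i + 1 : Nat) : Int) + 1) = ((i + 2 : Nat) : Int) := by push_cast; ring
        rw [h1, h2, PySem.List.slice_from_natCast, PySem.List.slice_from_natCast]
        rfl

-- ===== VERDICT =====
theorem skip_to_last_plate_spec : Claim_equal_skip_to_last_plate := by
  intro generator last_plate _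
  exact skipLoopA_true last_plate generator
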